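-- pv_equiv track=rewrite | github.com/developerashish02/DSA-PYTHON | recursion/subset pattern/subsequence.py | print_subsequence_ASCII_return
-- ===== SOURCE A (Python) =====
-- def print_subsequence_ASCII_return(p, up, index):
--     # base condition
--     if index == len(up):
--         ans = []
--         ans.append(p)
--         return ans
--
--     # first take the character at current index
--     first = print_subsequence_ASCII_return(p + up[index], up, index + 1)
--     # then skip the character at current index
--     second = print_subsequence_ASCII_return(p, up, index + 1)
--     # for the ascii value
--     third = print_subsequence_ASCII_return(
--         p + str(ord(up[index])), up,  index + 1)
--
--     first += second
--     first += third
--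
--     return first
-- ===== SOURCE B (Python) =====
-- def print_subsequence_ASCII_return(p, up, index):
--     # Iterative bottom-up build instead of three-way recursion:
--     # each position expands every partial string into [with-char, without, with-ascii].
--     result = [p]
--     for i in range(index, len(up)):
--         new = []
--         for s in result:
--             new.append(s + up[i])
--             new.append(s)
--             new.append(s + str(ord(up[i])))
--         result = new
--     return result
-- ===== Notes on version B (the rewrite author's own statement) =====
-- stated objective: alternative
-- what changed: Replaces the exponential three-way recursion with an iterative bottom-up build: one pass over the positions, expanding each partial string into its char/skip/ascii triple, which yields the same list in the same order without any recursion.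
import Mathlib
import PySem

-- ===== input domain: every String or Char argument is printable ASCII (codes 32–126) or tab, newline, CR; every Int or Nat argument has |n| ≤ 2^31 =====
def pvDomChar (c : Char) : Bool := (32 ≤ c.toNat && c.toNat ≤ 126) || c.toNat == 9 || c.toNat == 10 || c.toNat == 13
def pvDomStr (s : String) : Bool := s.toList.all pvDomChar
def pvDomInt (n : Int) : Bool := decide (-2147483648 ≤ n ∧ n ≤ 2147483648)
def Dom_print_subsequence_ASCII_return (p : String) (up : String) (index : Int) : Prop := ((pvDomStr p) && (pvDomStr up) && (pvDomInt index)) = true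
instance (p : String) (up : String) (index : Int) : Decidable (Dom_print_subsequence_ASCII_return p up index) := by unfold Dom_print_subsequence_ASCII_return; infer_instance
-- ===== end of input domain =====

-- B is an iterative bottom-up build of the same list; equivalence is about the return value.

-- ===== PORT A =====
-- literal port of A's three-way recursion; fuel = number of remaining positions
-- makes the recursion total (inside Pre_ the fuel is always sufficient)
def pvAgo (up : String) : Nat → String → Int → List String
  | fuel, p, index =>
    if index = PySem.Str.len up then [p]
    else
      match fuel with
      | 0 => []   -- unreachable inside Pre_ (Python would raise there)
      | Nat.succ f =>
        match PySem.Str.pyGet? up index with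
        | none => []   -- IndexError in Python; excluded by Pre_
        | some c =>
          let first := pvAgo up f (p ++ String.singleton c) (index + 1)
          let second := pvAgo up f p (index + 1)
          let third := pvAgo up f (p ++ PySem.Int.toStr (c.toNat : Int)) (index + 1)
          first ++ second ++ third

def print_subsequence_ASCII_return (p : String) (up : String) (index : Int) : List String :=
  pvAgo up (PySem.Str.len up - index).toNat p index

-- ===== PORT B =====
-- inner loop of B: expand every partial string into its char/skip/ascii triple
def pvExpand (up : String) (i : Int) (result : List String) : List String :=
  result.foldl (fun new s =>
    match PySem.Str.pyGet? up i with
    | none => new   -- IndexError in Python; excluded by Pre_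
    | some c => new ++ [s ++ String.singleton c, s, s ++ PySem.Int.toStr (c.toNat : Int)]) []

def print_subsequence_ASCII_return_alt (p : String) (up : String) (index : Int) : List String :=
  (PySem.List.pyRange index (PySem.Str.len up) 1).foldl
    (fun result i => pvExpand up i result) [p]

-- ===== PRECONDITION & SPEC =====
-- Pre_ excludes exactly the inputs where A raises IndexError: index < -len(up)
-- (out-of-range negative index) or index > len(up) (A never reaches its base case).
def Pre_print_subsequence_ASCII_return (p : String) (up : String) (index : Int) : Prop :=
  -(PySem.Str.len up) ≤ index ∧ index ≤ PySem.Str.len up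
instance (p : String) (up : String) (index : Int) : Decidable (Pre_print_subsequence_ASCII_return p up index) := by unfold Pre_print_subsequence_ASCII_return; infer_instance

def pvWitness_print_subsequence_ASCII_return : String × String × Int := ("x", "ab", 0)

def Spec_print_subsequence_ASCII_return (p : String) (up : String) (index : Int) (out : List String) : Prop := out = print_subsequence_ASCII_return_alt p up index
instance (p : String) (up : String) (index : Int) (out : List String) : Decidable (Spec_print_subsequence_ASCII_return p up index out) := by unfold Spec_print_subsequence_ASCII_return; infer_instance

-- ===== CLAIM (what is proved, stated in full; the proofs are below) =====
def Claim_equal_print_subsequence_ASCII_return : Prop := ∀ (p : String) (up : String) (index : Int), Dom_print_subsequence_ASCII_return p up index → Pre_print_subsequence_ASCII_return p up index → Spec_print_subsequence_ASCII_return p up index (print_subsequence_ASCII_return p up index)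


-- ===== LEMMAS AND PROOFS =====

-- pvExpand is additive in its accumulator argument
theorem pvExpand_append (up : String) (i : Int) (L1 L2 : List String) :
    pvExpand up i (L1 ++ L2) = pvExpand up i L1 ++ pvExpand up i L2 := by
  unfold pvExpand
  cases h : PySem.Str.pyGet? up i with
  | none => simp
  | some c =>
    simp only [PySem.List.foldl_append_eq_flatMap]
    simp [List.flatMap_append]

theorem foldl_expand_append (up : String) (rng : List Int) (L1 L2 : List String) :
    rng.foldl (fun r i => pvExpand up i r) (L1 ++ L2)
      = rng.foldl (fun r i => pvExpand up i r) L1 ++ rng.foldl (fun r i => pvExpand up i r) L2 := by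
  induction rng generalizing L1 L2 with
  | nil => rfl
  | cons a t ih => simp only [List.foldl_cons, pvExpand_append, ih]

theorem pvExpand_singleton (up : String) (i : Int) (p : String) (c : Char)
    (hc : PySem.Str.pyGet? up i = some c) :
    pvExpand up i [p] = [p ++ String.singleton c, p, p ++ PySem.Int.toStr (c.toNat : Int)] := by
  have hc' : PySem.List.pyGet? up.toList i = some c := by simpa [PySem.Str.pyGet?] using hc
  simp [pvExpand, PySem.Str.pyGet?, hc', String.push]

theorem pvAgo_eq_foldl (up : String) (fuel : Nat) :
    ∀ (p : String) (index : Int), -(PySem.Str.len up) ≤ index → index ≤ PySem.Str.len up →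
      PySem.Str.len up - index ≤ (fuel : Int) →
      pvAgo up fuel p index
        = (PySem.List.pyRange index (PySem.Str.len up) 1).foldl (fun r i => pvExpand up i r) [p] := by
  induction fuel with
  | zero =>
    intro p index hlo hhi hf
    have hix : index = PySem.Str.len up := by omega
    rw [pvAgo, if_pos hix, PySem.List.pyRange_one_eq_nil (by omega)]
    rfl
  | succ f ih =>
    intro p index hlo hhi hf
    by_cases hix : index = PySem.Str.len up
    · rw [pvAgo, if_pos hix, PySem.List.pyRange_one_eq_nil (by omega)]
      rfl
    · have hlt : index < PySem.Str.len up := lt_of_le_of_ne hhi hix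
      have hin : PySem.Raise.InRange up.toList.length index := by
        constructor <;> simp_all [PySem.Str.len]
      obtain ⟨c, hc⟩ : ∃ c, PySem.Str.pyGet? up index = some c := by
        cases h : PySem.Str.pyGet? up index with
        | none =>
          exfalso
          have := (PySem.List.pyGet?_eq_none_iff (xs := up.toList) (i := index)).mp (by
            simpa [PySem.Str.pyGet?] using h)
          exact this hin
        | some c => exact ⟨c, rfl⟩
      rw [pvAgo, if_neg hix]
      simp only [hc]
      rw [PySem.List.pyRange_one_cons hlt]
      simp only [List.foldl_cons]
      rw [pvExpand_singleton up index p c hc]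
      have h3 : ([p ++ String.singleton c, p, p ++ PySem.Int.toStr (c.toNat : Int)] : List String)
          = [p ++ String.singleton c] ++ ([p] ++ [p ++ PySem.Int.toStr (c.toNat : Int)]) := rfl
      rw [h3, foldl_expand_append, foldl_expand_append]
      rw [ih (p ++ String.singleton c) (index + 1) (by omega) (by omega) (by omega),
          ih p (index + 1) (by omega) (by omega) (by omega),
          ih (p ++ PySem.Int.toStr (c.toNat : Int)) (index + 1) (by omega) (by omega) (by omega)]
      simp [List.append_assoc]

-- ===== VERDICT (by name: the statement is the Claim_ definition above) =====
theorem print_subsequence_ASCII_return_spec : Claim_equal_print_subsequence_ASCII_return := by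
  intro p up index _hdom hpre
  obtain ⟨hlo, hhi⟩ := hpre
  unfold Spec_print_subsequence_ASCII_return print_subsequence_ASCII_return print_subsequence_ASCII_return_alt
  exact pvAgo_eq_foldl up _ p index hlo hhi (by omega)
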